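-- pv_equiv track=rewrite | github.com/suriya4code/dsa_algo | 2D_Array/anti_diagnol_list.py | diagnol_sum_sln
-- ===== SOURCE A (Python) =====
-- def diagnol_sum_sln(A):
--     p = len(A[0])
--     res = [0]*(2*p-1)
--     for i in range((2*p)-1):
--         res[i] = []
--     for i in range(p):
--         for j in range(p):
--             res[i+j].append(A[i][j])
--     for i in range(2*p-1):
--         while len(res[i]) < p:
--             res[i].append(0)
--     return res
-- ===== SOURCE B (Python) =====
-- def diagnol_sum_sln(A):
--     p = len(A[0])
--     res = []
--     for d in range(2 * p - 1):
--         diag = [A[i][d - i] for i in range(p) if i <= d < i + p]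
--         res.append(diag + [0] * (p - len(diag)))
--     return res
-- ===== Notes on version B (the rewrite author's own statement) =====
-- stated objective: simpler
-- what changed: Replaces A's scatter (preallocate 2p-1 buckets, nested i,j loops appending A[i][j] to bucket i+j, then a padding pass) with a direct gather: each output row d is built independently as the comprehension [A[i][d-i] for valid i] padded with zeros.
import Mathlib
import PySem

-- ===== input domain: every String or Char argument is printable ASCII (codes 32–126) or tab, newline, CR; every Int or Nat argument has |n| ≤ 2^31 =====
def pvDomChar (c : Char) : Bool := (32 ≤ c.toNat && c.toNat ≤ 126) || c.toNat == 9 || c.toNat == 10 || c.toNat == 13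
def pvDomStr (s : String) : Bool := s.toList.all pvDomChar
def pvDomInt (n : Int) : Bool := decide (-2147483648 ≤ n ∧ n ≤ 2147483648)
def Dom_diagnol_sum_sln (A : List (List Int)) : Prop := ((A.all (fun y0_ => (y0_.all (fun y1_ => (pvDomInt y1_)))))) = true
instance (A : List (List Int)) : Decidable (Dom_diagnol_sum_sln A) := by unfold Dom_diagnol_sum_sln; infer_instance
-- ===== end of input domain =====

-- ===== PORT A =====
-- Header: B rebuilds each anti-diagonal independently (gather per diagonal index) instead of
-- A's scatter into a preallocated list of buckets; objective: simpler (return-value equivalence;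
-- neither version mutates its argument).

-- A's `while len(res[i]) < p: res[i].append(0)` loop, step for step
def padWhile (p : Nat) (row : List Int) : List Int :=
  if row.length < p then padWhile p (row ++ [0]) else row
termination_by p - row.length
decreasing_by simp; omega

-- Python: res = [0]*(2p-1) then res[i] = [] for every i: the int placeholders are all
-- overwritten before use, so the initial list is transliterated as replicate (2p-1) [].
def diagnol_sum_sln (A : List (List Int)) : List (List Int) :=
  let p := (A.headD []).length
  let res0 : List (List Int) := List.replicate (2*p-1) []
  let res1 := (List.range p).foldl (fun res i =>
      (List.range p).foldl (fun res j =>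
        res.modify (i+j) (fun row => row ++ [(A.getD i []).getD j 0])) res) res0
  (List.range (2*p-1)).foldl (fun res i => res.modify i (padWhile p)) res1

-- ===== PORT B =====
def diagnol_sum_sln_alt (A : List (List Int)) : List (List Int) :=
  let p := (A.headD []).length
  (List.range (2*p-1)).map (fun d =>
    let diag := ((List.range p).filter (fun i => decide (i ≤ d) && decide (d < i + p))).map
        (fun i => (A.getD i []).getD (d - i) 0)
    diag ++ List.replicate (p - diag.length) 0)

-- ===== PRECONDITION & SPEC =====
-- Pre_ excludes exactly the inputs where Python A raises IndexError: the empty list (A[0])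
-- and matrices with fewer than p rows or with one of the first p rows shorter than p = len(A[0]).
def Pre_diagnol_sum_sln (A : List (List Int)) : Prop :=
  A ≠ [] ∧ (A.headD []).length ≤ A.length ∧
    ∀ i < (A.headD []).length, (A.headD []).length ≤ (A.getD i []).length
instance (A : List (List Int)) : Decidable (Pre_diagnol_sum_sln A) := by
  unfold Pre_diagnol_sum_sln; infer_instance

def pvWitness_diagnol_sum_sln : List (List Int) := [[1, 2], [3, 4]]

def Spec_diagnol_sum_sln (A : List (List Int)) (out : List (List Int)) : Prop := out = diagnol_sum_sln_alt A
instance (A : List (List Int)) (out : List (List Int)) : Decidable (Spec_diagnol_sum_sln A out) := by unfold Spec_diagnol_sum_sln; infer_instance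

-- ===== CLAIM (what is proved, stated in full; the proofs are below) =====
def Claim_equal_diagnol_sum_sln : Prop := ∀ (A : List (List Int)), Dom_diagnol_sum_sln A → Pre_diagnol_sum_sln A → Spec_diagnol_sum_sln A (diagnol_sum_sln A)

-- ===== LEMMAS AND PROOFS =====

-- a fold of single-index modifications preserves the length
theorem foldl_modify_length {σ : Type} (l : List σ) (k : σ → Nat)
    (u : σ → List Int → List Int) (init : List (List Int)) :
    (l.foldl (fun r s => r.modify (k s) (u s)) init).length = init.length := by
  induction l generalizing init with
  | nil => rfl
  | cons s t ih => simp [List.foldl_cons, ih]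

-- characterisation of the scatter fold: bucket d collects, in order, the values of the
-- pairs whose index is d
theorem scatter_getElem? (l : List (Nat × Int)) (init : List (List Int)) (d : Nat) :
    ((l.foldl (fun r q => r.modify q.1 (fun row => row ++ [q.2])) init))[d]? =
      init[d]?.map (fun row => row ++ (l.filter (fun q => q.1 == d)).map (·.2)) := by
  induction l generalizing init with
  | nil => cases h : init[d]? <;> simp [h]
  | cons q t ih =>
    rw [List.foldl_cons, ih, List.getElem?_modify]
    by_cases hq : q.1 = d
    · subst hq
      cases h : init[q.1]? <;> simp [h, Option.map_map, Function.comp]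
    · cases h : init[d]? <;> simp [h, hq, Option.map_map, Function.comp]

-- foldl over a flatMap
theorem foldl_flatMap' {α β γ : Type} (l : List α) (f : α → List β)
    (g : γ → β → γ) (init : γ) :
    (l.flatMap f).foldl g init = l.foldl (fun x a => (f a).foldl g x) init := by
  induction l generalizing init with
  | nil => rfl
  | cons a t ih => simp [List.flatMap_cons, List.foldl_append, ih]

-- filter of a range by "i + j = d"
theorem range_filter_add_eq (p i d : Nat) :
    (List.range p).filter (fun j => i + j == d) =
      if i ≤ d ∧ d < i + p then [d - i] else [] := by
  induction p with
  | zero => simp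
  | succ p ih =>
    rw [List.range_succ, List.filter_append, ih]
    by_cases h1 : i ≤ d ∧ d < i + p
    · have : ¬ (i + p = d) := by omega
      simp [h1, this]
      omega
    · by_cases h2 : i + p = d
      · have hd : d - i = p := by omega
        have : i ≤ d ∧ d < i + (p+1) := by omega
        simp [h1, h2, this, hd]
      · have : ¬ (i ≤ d ∧ d < i + (p+1)) := by omega
        simp [h1, h2, this]

-- flatMap of an if-singleton is map of filter
theorem flatMap_if_singleton {α β : Type} (l : List α) (c : α → Bool) (f : α → β) :
    (l.flatMap (fun a => if c a then [f a] else [])) = (l.filter c).map f := by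
  induction l with
  | nil => rfl
  | cons a t ih =>
    by_cases h : c a <;> simp [List.flatMap_cons, h, ih]

-- padWhile pads on the right with zeros up to length p
theorem padWhile_eq_aux : ∀ (n p : Nat) (row : List Int), p - row.length = n →
    padWhile p row = row ++ List.replicate (p - row.length) 0 := by
  intro n
  induction n with
  | zero =>
    intro p row h
    rw [padWhile]
    have : ¬ row.length < p := by omega
    simp [this, h]
  | succ n ih =>
    intro p row h
    have hlt : row.length < p := by omega
    rw [padWhile, if_pos hlt, ih p (row ++ [0]) (by simp; omega)]
    have h2 : p - (row ++ [0]).length = n := by simp; omega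
    have h3 : p - row.length = n + 1 := h
    rw [h2, h3, List.append_assoc]
    congr 1

theorem padWhile_eq (p : Nat) (row : List Int) :
    padWhile p row = row ++ List.replicate (p - row.length) 0 :=
  padWhile_eq_aux (p - row.length) p row rfl

-- the per-index pad loop, characterised pointwise
theorem padloop_getElem? (g : List Int → List Int) (n : Nat) (r : List (List Int)) (d : Nat) :
    ((List.range n).foldl (fun res i => res.modify i g) r)[d]? =
      if d < n then r[d]?.map g else r[d]? := by
  induction n generalizing d with
  | zero => simp
  | succ n ih =>
    rw [List.range_succ, List.foldl_append]
    simp only [List.foldl_cons, List.foldl_nil]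
    rw [List.getElem?_modify, ih]
    by_cases h2 : n = d
    · subst h2
      cases r[n]? <;> simp
    · by_cases h1 : d < n
      · have h3 : d < n + 1 := by omega
        cases r[d]? <;> simp [h1, h2, h3]
      · have h3 : ¬ d < n + 1 := by omega
        cases r[d]? <;> simp [h1, h2, h3]

-- the scatter value at bucket d, with the nested range loops flattened
theorem scatter_core (a : Nat → Nat → Int) (p d : Nat) (init : List (List Int)) :
    ((List.range p).foldl (fun res i =>
        (List.range p).foldl (fun res j =>
          res.modify (i+j) (fun row => row ++ [a i j])) res) init)[d]? =
      init[d]?.map (fun row => row ++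
        (((List.range p).filter (fun i => decide (i ≤ d) && decide (d < i + p))).map
          (fun i => a i (d - i)))) := by
  have hflat : (List.range p).foldl (fun res i =>
        (List.range p).foldl (fun res j =>
          res.modify (i+j) (fun row => row ++ [a i j])) res) init =
      ((List.range p).flatMap (fun i => (List.range p).map (fun j => (i+j, a i j)))).foldl
        (fun r q => r.modify q.1 (fun row => row ++ [q.2])) init := by
    rw [foldl_flatMap']
    congr 1
    funext res i
    rw [List.foldl_map]
  rw [hflat, scatter_getElem?]
  congr 1
  funext row
  congr 1
  rw [List.filter_flatMap]
  have hinner : ∀ i, (((List.range p).map (fun j => (i+j, a i j))).filter (fun q => q.1 == d)) =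
      if decide (i ≤ d) && decide (d < i + p) then [(i + (d - i), a i (d - i))] else [] := by
    intro i
    rw [List.filter_map]
    have : ((fun q => q.1 == d) ∘ fun j => (i+j, a i j)) = (fun j => i + j == d) := by
      funext j; rfl
    rw [this, range_filter_add_eq]
    by_cases h : i ≤ d ∧ d < i + p
    · simp [h]
    · simp [h]
  have : ((List.range p).flatMap (fun i =>
        (((List.range p).map (fun j => (i+j, a i j))).filter (fun q => q.1 == d)))).map (·.2) =
      ((List.range p).flatMap (fun i =>
        if decide (i ≤ d) && decide (d < i + p) then [(i + (d - i), a i (d - i))] else [])).map (·.2) := by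
    congr 1
    exact List.flatMap_congr (fun i _ => hinner i)
  rw [this, flatMap_if_singleton (f := fun i => (i + (d - i), a i (d - i))), List.map_map]
  rfl

-- the scatter fold preserves the length
theorem scatter_length (a : Nat → Nat → Int) (p : Nat) (init : List (List Int)) :
    ((List.range p).foldl (fun res i =>
        (List.range p).foldl (fun res j =>
          res.modify (i+j) (fun row => row ++ [a i j])) res) init).length = init.length := by
  have : ∀ (l : List Nat) (init : List (List Int)),
      (l.foldl (fun res i => (List.range p).foldl (fun res j =>
        res.modify (i+j) (fun row => row ++ [a i j])) res) init).length = init.length := by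
    intro l
    induction l with
    | nil => intro init; rfl
    | cons i t ih =>
      intro init
      rw [List.foldl_cons, ih]
      exact foldl_modify_length (List.range p) (fun j => i + j) (fun j row => row ++ [a i j]) init
  exact this (List.range p) init

-- ===== VERDICT (by name: the statement is the Claim_ definition above) =====
theorem diagnol_sum_sln_spec : Claim_equal_diagnol_sum_sln := by
  intro A _ _
  unfold Spec_diagnol_sum_sln diagnol_sum_sln diagnol_sum_sln_alt
  apply List.ext_getElem?
  intro d
  rw [padloop_getElem?, List.getElem?_map]
  by_cases hd : d < 2 * (A.headD []).length - 1
  · rw [if_pos hd, scatter_core, List.getElem?_replicate, if_pos hd,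
      List.getElem?_range hd]
    simp only [Option.map_some, List.nil_append]
    rw [padWhile_eq]
  · rw [if_neg hd,
      List.getElem?_eq_none (by rw [scatter_length]; simp only [List.length_replicate]; omega),
      List.getElem?_eq_none (l := List.range _) (by simp only [List.length_range]; omega)]
    rfl
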